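-- pv_equiv track=rewrite | github.com/radomirbosak/kemonowars | kemonowars.py | possible_expansion
-- ===== SOURCE A (Python) =====
-- CELL_WATER = -1
--
-- def gen_neighbors(tiles, x, y):
--     for (xd, yd) in [(-1, 0), (1, 0), (0, -1), (0, 1)]:
--         if x + xd < 0:
--             continue
--         if x + xd >= len(tiles[0]):
--             continue
--         if y + yd < 0:
--             continue
--         if y + yd >= len(tiles):
--             continue
--
--         yield (x + xd, y + yd)
--
-- def possible_expansion(player_id, tiles):
--     possibilities = set()
--
--     for y, row in enumerate(tiles):
--         for x, cell in enumerate(row):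
--             neighbor_players = set(
--                 tiles[ny][nx] for
--                 nx, ny in gen_neighbors(tiles, x, y)
--             )
--
--             if cell not in [CELL_WATER, player_id] \
--                     and player_id in neighbor_players:
--                 possibilities.add((x, y))
--     return possibilities
-- ===== SOURCE B (Python) =====
-- CELL_WATER = -1
--
-- def adjacent_mask(owned, y):
--     """Boolean row marking cells of row y with an owned 4-neighbor, by OR-ing
--     shifted copies of the ownership mask."""
--     mine = owned[y]
--     width = len(mine)
--     up = owned[y - 1] if y > 0 else [False] * width
--     down = owned[y + 1] if y + 1 < len(owned) else [False] * width
--     left = [False] + mine[:-1]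
--     right = mine[1:] + [False]
--     return [l or r or u or d for (((l, r), u), d) in
--             zip(zip(zip(left, right), up), down)]
--
-- def possible_expansion(player_id, tiles):
--     # Mask-shift formulation: build the ownership grid once, then OR together its
--     # four shifted copies per row instead of inspecting each cell's neighborhood.
--     owned = [[cell == player_id for cell in row] for row in tiles]
--     result = set()
--     for y, row in enumerate(tiles):
--         near = adjacent_mask(owned, y)
--         for x, (cell, n) in enumerate(zip(row, near)):
--             if n and cell != CELL_WATER and cell != player_id:
--                 result.add((x, y))
--     return result
-- ===== Notes on version B (the rewrite author's own statement) =====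
-- stated objective: alternative
-- what changed: B builds a boolean ownership grid once and marks expandable cells by OR-ing four shifted copies of that mask per row, instead of A's per-cell collection of a neighbor-value set via a generator.
-- outside the precondition, e.g. on possible_expansion(0, [[5], [3, 0]]): A returns set(), B returns {(0, 1)}
import Mathlib
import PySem

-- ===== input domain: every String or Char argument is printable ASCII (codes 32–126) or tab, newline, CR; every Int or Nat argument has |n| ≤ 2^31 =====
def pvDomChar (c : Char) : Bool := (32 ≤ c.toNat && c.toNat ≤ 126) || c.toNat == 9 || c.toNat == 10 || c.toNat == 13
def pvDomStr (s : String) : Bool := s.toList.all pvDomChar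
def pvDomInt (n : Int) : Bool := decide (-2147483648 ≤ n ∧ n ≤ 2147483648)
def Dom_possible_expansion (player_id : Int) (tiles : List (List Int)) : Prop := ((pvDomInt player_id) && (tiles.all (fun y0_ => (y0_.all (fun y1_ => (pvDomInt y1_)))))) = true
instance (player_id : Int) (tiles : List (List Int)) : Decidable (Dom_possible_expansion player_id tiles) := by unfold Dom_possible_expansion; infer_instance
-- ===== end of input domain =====

-- B replaces A's per-cell neighborhood inspection by OR-ing shifted copies of a
-- boolean ownership mask (an 'alternative' objective: same O(W*H) cost, different algorithm).

-- ===== PORT A =====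
def gen_neighbors (tiles : List (List Int)) (x y : Int) : List (Int × Int) :=
  ([(-1, 0), (1, 0), (0, -1), (0, 1)] : List (Int × Int)).foldl (fun acc d =>
    if x + d.1 < 0 then acc
    else if PySem.List.len (PySem.List.pyGetD tiles 0 []) ≤ x + d.1 then acc
    else if y + d.2 < 0 then acc
    else if PySem.List.len tiles ≤ y + d.2 then acc
    else acc ++ [(x + d.1, y + d.2)]) []

def possible_expansion (player_id : Int) (tiles : List (List Int)) : List (Int × Int) :=
  (PySem.List.enumerate tiles 0).foldl (fun poss yrow =>
    (PySem.List.enumerate yrow.2 0).foldl (fun poss xcell =>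
      let neighbor_players : PySem.Set Int :=
        PySem.Set.ofList ((gen_neighbors tiles xcell.1 yrow.1).map
          (fun p => PySem.List.pyGetD (PySem.List.pyGetD tiles p.2 []) p.1 0))
      if xcell.2 ∉ ([-1, player_id] : List Int) ∧ player_id ∈ neighbor_players
      then PySem.Set.add poss (xcell.1, yrow.1) else poss) poss) PySem.Set.empty

-- ===== PORT B =====
def adjacent_mask (owned : List (List Bool)) (y : Int) : List Bool :=
  let mine := PySem.List.pyGetD owned y []
  let width := PySem.List.len mine
  let up := if 0 < y then PySem.List.pyGetD owned (y - 1) []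
            else List.replicate width.toNat false
  let down := if y + 1 < PySem.List.len owned then PySem.List.pyGetD owned (y + 1) []
              else List.replicate width.toNat false
  let left := false :: PySem.List.slice mine none (some (-1))
  let right := PySem.List.slice mine (some 1) none ++ [false]
  (((left.zip right).zip up).zip down).map (fun q => q.1.1.1 || q.1.1.2 || q.1.2 || q.2)

def possible_expansion_alt (player_id : Int) (tiles : List (List Int)) : List (Int × Int) :=
  let owned := tiles.map (fun row => row.map (fun cell => cell == player_id))
  (PySem.List.enumerate tiles 0).foldl (fun result yrow =>
    let near := adjacent_mask owned yrow.1
    (PySem.List.enumerate (yrow.2.zip near) 0).foldl (fun result xc =>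
      if xc.2.2 = true ∧ xc.2.1 ≠ -1 ∧ xc.2.1 ≠ player_id
      then PySem.Set.add result (xc.1, yrow.1) else result) result) PySem.Set.empty

-- ===== PRECONDITION & SPEC =====
-- Pre_ excludes ragged (non-rectangular) grids: there A indexes every row by row 0's
-- width, so it raises IndexError or silently skips/miscounts cells, while B uses each
-- row's own width.
def Pre_possible_expansion (player_id : Int) (tiles : List (List Int)) : Prop :=
  ∀ row ∈ tiles, row.length = (tiles.headD []).length
instance (player_id : Int) (tiles : List (List Int)) : Decidable (Pre_possible_expansion player_id tiles) := by unfold Pre_possible_expansion; infer_instance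

def pvWitness_possible_expansion : Int × List (List Int) := (1, [[1, 0], [-1, 2]])

def Spec_possible_expansion (player_id : Int) (tiles : List (List Int)) (out : List (Int × Int)) : Prop := out = possible_expansion_alt player_id tiles
instance (player_id : Int) (tiles : List (List Int)) (out : List (Int × Int)) : Decidable (Spec_possible_expansion player_id tiles out) := by unfold Spec_possible_expansion; infer_instance

-- ===== CLAIM (what is proved, stated in full; the proofs are below) =====
def Claim_equal_possible_expansion : Prop := ∀ (player_id : Int) (tiles : List (List Int)), Dom_possible_expansion player_id tiles → Pre_possible_expansion player_id tiles → Spec_possible_expansion player_id tiles (possible_expansion player_id tiles)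

-- ===== LEMMAS AND PROOFS =====

-- congruence between two enumerate-folds over lists of equal length whose bodies agree pointwise
theorem pv_foldl_enumerate_congr2 {α β γ : Type} (xs : List α) (ys : List β) (s : Int)
    (F : γ → Int × α → γ) (G : γ → Int × β → γ)
    (hlen : ys.length = xs.length)
    (h : ∀ (k : Nat) (hk : k < xs.length) (p : γ),
      F p (s + k, xs[k]) = G p (s + k, ys[k]'(by omega))) :
    ∀ p, (PySem.List.enumerate xs s).foldl F p = (PySem.List.enumerate ys s).foldl G p := by
  induction xs generalizing ys s with
  | nil => cases ys with
    | nil => intro p; rfl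
    | cons b bs => simp at hlen
  | cons a as ih =>
    cases ys with
    | nil => simp at hlen
    | cons b bs =>
      intro p
      simp only [PySem.List.enumerate_cons, List.foldl_cons]
      have h0 := h 0 (by simp) p
      simp at h0
      rw [h0]
      apply ih bs (s + 1) (by simpa using hlen)
      intro k hk q
      have := h (k + 1) (by simpa using hk) q
      simpa [add_assoc, add_comm, add_left_comm] using this

-- a row fetched with a nonnegative in-range index has the grid's common width
theorem pv_row_len {α : Type} (g : List (List α)) (W : Nat)
    (hrect : ∀ r ∈ g, r.length = W) (i : Int) (h0 : 0 ≤ i) (h1 : i < (g.length : Int)) :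
    (PySem.List.pyGetD g i []).length = W := by
  rw [PySem.List.pyGetD_eq_getElem g [] h0 h1]
  exact hrect _ (List.getElem_mem _)

-- the shifted-mask row has the grid's common width
theorem pv_len_mask (owned : List (List Bool)) (W ky : Nat)
    (hrect : ∀ r ∈ owned, r.length = W) (hky : ky < owned.length) :
    (adjacent_mask owned (ky : Int)).length = W := by
  have hmg : owned[ky]? = some (owned[ky]) := List.getElem?_eq_getElem hky
  have hminel : (owned[ky]'hky).length = W := hrect _ (List.getElem_mem _)
  simp [adjacent_mask, PySem.List.slice_to_neg_one, PySem.List.slice_from_one,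
    PySem.List.len_eq, apply_ite List.length, hmg, hminel]
  split_ifs with h1 h2 h2 <;>
    [ (rw [pv_row_len owned W hrect _ (by omega) (by omega),
           pv_row_len owned W hrect _ (by omega) (by omega)]);
      (rw [pv_row_len owned W hrect ((ky : Int) - 1) (by omega) (by omega)]);
      (rw [pv_row_len owned W hrect ((ky : Int) + 1) (by omega) (by omega)]);
      skip ] <;> omega

-- value of the shifted-mask row at an in-range index
theorem pv_getD_mask (owned : List (List Bool)) (W ky k : Nat)
    (hrect : ∀ r ∈ owned, r.length = W) (hky : ky < owned.length) (hk : k < W) :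
    (adjacent_mask owned (ky : Int)).getD k false =
      ((decide (0 < k) && (PySem.List.pyGetD owned (ky : Int) []).getD (k - 1) false) ||
       (decide (k + 1 < W) && (PySem.List.pyGetD owned (ky : Int) []).getD (k + 1) false) ||
       (decide (0 < ky) && (PySem.List.pyGetD owned ((ky : Int) - 1) []).getD k false) ||
       (decide (ky + 1 < owned.length) && (PySem.List.pyGetD owned ((ky : Int) + 1) []).getD k false)) := by
  have hmaskl := pv_len_mask owned W ky hrect hky
  have hpg : PySem.List.pyGetD owned ((ky : Int)) [] = owned[ky]'hky := by
    rw [PySem.List.pyGetD_natCast]; exact List.getD_eq_getElem _ _ hky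
  have hminel : (owned[ky]'hky).length = W := hrect _ (List.getElem_mem _)
  rw [List.getD_eq_getElem _ _ (by omega)]
  simp only [adjacent_mask, PySem.List.slice_to_neg_one, PySem.List.slice_from_one,
    PySem.List.len_eq, List.getElem_map, List.getElem_zip, hpg]
  have hL : ∀ (h : k < (false :: (owned[ky]'hky).dropLast).length),
      (false :: (owned[ky]'hky).dropLast)[k]'h = (decide (0 < k) && (owned[ky]'hky).getD (k - 1) false) := by
    intro h
    cases k with
    | zero => simp
    | succ j =>
      rw [List.getElem_cons_succ, List.getElem_dropLast]
      simp [List.getElem?_eq_getElem (show j < (owned[ky]'hky).length by omega)]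
  have hR : ∀ (h : k < ((owned[ky]'hky).tail ++ [false]).length),
      ((owned[ky]'hky).tail ++ [false])[k]'h = (decide (k + 1 < W) && (owned[ky]'hky).getD (k + 1) false) := by
    intro h
    by_cases hc : k + 1 < W
    · rw [List.getElem_append_left (by simp [List.length_tail]; omega)]
      rw [List.getElem_tail]
      simp [hc, List.getElem?_eq_getElem (show k + 1 < (owned[ky]'hky).length by omega)]
    · rw [List.getElem_append_right (by simp [List.length_tail]; omega)]
      simp [hc]
  have hU : ∀ (h : k < (if (0:Int) < (ky:Int) then PySem.List.pyGetD owned ((ky:Int) - 1) []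
        else List.replicate ((((owned[ky]'hky).length : Int)).toNat) false).length),
      (if (0:Int) < (ky:Int) then PySem.List.pyGetD owned ((ky:Int) - 1) []
        else List.replicate ((((owned[ky]'hky).length : Int)).toNat) false)[k]'h =
      (decide (0 < ky) && (PySem.List.pyGetD owned ((ky:Int) - 1) []).getD k false) := by
    intro h
    by_cases hc : 0 < ky
    · have hlu : (PySem.List.pyGetD owned ((ky:Int) - 1) []).length = W :=
        pv_row_len owned W hrect _ (by omega) (by omega)
      simp only [if_pos (show (0:Int) < (ky:Int) by omega)] at h ⊢
      simp [hc, List.getElem?_eq_getElem (show k < (PySem.List.pyGetD owned ((ky:Int) - 1) []).length by omega)]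
    · simp only [if_neg (show ¬((0:Int) < (ky:Int)) by omega)] at h ⊢
      simp [hc]
  have hD : ∀ (h : k < (if (ky:Int) + 1 < ((owned.length : Nat) : Int) then PySem.List.pyGetD owned ((ky:Int) + 1) []
        else List.replicate ((((owned[ky]'hky).length : Int)).toNat) false).length),
      (if (ky:Int) + 1 < ((owned.length : Nat) : Int) then PySem.List.pyGetD owned ((ky:Int) + 1) []
        else List.replicate ((((owned[ky]'hky).length : Int)).toNat) false)[k]'h =
      (decide (ky + 1 < owned.length) && (PySem.List.pyGetD owned ((ky:Int) + 1) []).getD k false) := by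
    intro h
    by_cases hc : ky + 1 < owned.length
    · have hld : (PySem.List.pyGetD owned ((ky:Int) + 1) []).length = W :=
        pv_row_len owned W hrect _ (by omega) (by omega)
      simp only [if_pos (show (ky:Int) + 1 < ((owned.length : Nat) : Int) by omega)] at h ⊢
      simp [hc, List.getElem?_eq_getElem (show k < (PySem.List.pyGetD owned ((ky:Int) + 1) []).length by omega)]
    · simp only [if_neg (show ¬((ky:Int) + 1 < ((owned.length : Nat) : Int)) by omega)] at h ⊢
      simp [hc]
  simp only [hL, hR, hU, hD]

-- a grid cell read through Python indexing is the getElem value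
theorem pv_tget (tiles : List (List Int)) (W : Nat)
    (hrect : ∀ r ∈ tiles, r.length = W) (ny nx : Nat)
    (hny : ny < tiles.length) (hnx : nx < W) :
    PySem.List.pyGetD (PySem.List.pyGetD tiles ((ny : Nat) : Int) []) ((nx : Nat) : Int) 0 =
      (tiles[ny]'hny)[nx]'(by rw [hrect _ (List.getElem_mem hny)]; exact hnx) := by
  rw [PySem.List.pyGetD_eq_getElem tiles [] (by omega) (by omega)]
  simp only [Int.toNat_natCast]
  rw [PySem.List.pyGetD_eq_getElem _ 0 (by omega)
    (by rw [hrect _ (List.getElem_mem hny)]; omega)]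
  simp

-- an ownership-mask cell read through Python indexing is a comparison with the grid cell
theorem pv_oget (pid : Int) (tiles : List (List Int)) (W : Nat)
    (hrect : ∀ r ∈ tiles, r.length = W) (ny nx : Nat)
    (hny : ny < tiles.length) (hnx : nx < W) :
    (PySem.List.pyGetD (tiles.map (fun row => row.map (fun cell => cell == pid))) ((ny : Nat) : Int) []).getD nx false =
      decide (pid = (tiles[ny]'hny)[nx]'(by rw [hrect _ (List.getElem_mem hny)]; exact hnx)) := by
  rw [PySem.List.pyGetD_eq_getElem _ [] (by omega) (by simp; omega)]
  rw [List.getD_eq_getElem _ _ (by simp [Int.toNat_natCast]; rw [hrect _ (List.getElem_mem hny)]; omega)]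
  simp only [List.getElem_map, Int.toNat_natCast]
  rw [Bool.eq_iff_iff]
  simp only [beq_iff_eq, decide_eq_true_eq]
  exact eq_comm

-- gen_neighbors as one filter-and-map pass over the four offsets
theorem pv_gen_eq (tiles : List (List Int)) (x y : Int) :
    gen_neighbors tiles x y = List.map (fun d : Int × Int => (x + d.1, y + d.2))
      (([(-1, 0), (1, 0), (0, -1), (0, 1)] : List (Int × Int)).filter
        (fun d => decide (0 ≤ x + d.1) &&
          decide (x + d.1 < PySem.List.len (PySem.List.pyGetD tiles 0 [])) &&
          decide (0 ≤ y + d.2) && decide (y + d.2 < PySem.List.len tiles))) := by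
  unfold gen_neighbors
  have hbody : (fun (acc : List (Int × Int)) (d : Int × Int) =>
      if x + d.1 < 0 then acc
      else if PySem.List.len (PySem.List.pyGetD tiles 0 []) ≤ x + d.1 then acc
      else if y + d.2 < 0 then acc
      else if PySem.List.len tiles ≤ y + d.2 then acc
      else acc ++ [(x + d.1, y + d.2)]) =
    (fun acc d => if (decide (0 ≤ x + d.1) &&
          decide (x + d.1 < PySem.List.len (PySem.List.pyGetD tiles 0 [])) &&
          decide (0 ≤ y + d.2) && decide (y + d.2 < PySem.List.len tiles)) = true
        then acc ++ [(x + d.1, y + d.2)] else acc) := by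
    funext acc d
    simp only [Bool.and_eq_true, decide_eq_true_eq]
    by_cases a1 : x + d.1 < 0 <;> by_cases a2 : PySem.List.len (PySem.List.pyGetD tiles 0 []) ≤ x + d.1 <;>
    by_cases a3 : y + d.2 < 0 <;> by_cases a4 : PySem.List.len tiles ≤ y + d.2 <;>
      simp only [a1, a2, a3, a4, if_true, if_false, ite_true, ite_false] <;>
      split_ifs <;> first | rfl | omega
  rw [hbody, PySem.List.foldl_append_if]
  simp

-- the neighbor-set membership test of A agrees with the shifted-mask bit of B
set_option maxHeartbeats 1600000 in
theorem pv_adj_iff (pid : Int) (tiles : List (List Int)) (W ky k : Nat)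
    (hrect : ∀ r ∈ tiles, r.length = W)
    (hW0 : (tiles.headD []).length = W)
    (hky : ky < tiles.length) (hk : k < W) :
    (pid ∈ (gen_neighbors tiles ((k : Nat) : Int) ((ky : Nat) : Int)).map
        (fun p => PySem.List.pyGetD (PySem.List.pyGetD tiles p.2 []) p.1 0)) ↔
    ((adjacent_mask (tiles.map (fun row => row.map (fun cell => cell == pid))) ((ky : Nat) : Int)).getD k false = true) := by
  have hrecto : ∀ r ∈ tiles.map (fun row => row.map (fun cell => cell == pid)), r.length = W := by
    intro r hr
    obtain ⟨row, hrow, rfl⟩ := List.mem_map.mp hr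
    simp [hrect row hrow]
  have hkyo : ky < (tiles.map (fun row => row.map (fun cell => cell == pid))).length := by
    simp [hky]
  rw [pv_getD_mask _ W ky k hrecto hkyo hk]
  rw [pv_gen_eq]
  have hlen0 : PySem.List.len (PySem.List.pyGetD tiles 0 []) = (W : Int) := by
    cases tiles with
    | nil => simp at hky
    | cons r rs =>
      rw [PySem.List.pyGetD_zero_cons, PySem.List.len_eq]
      simp at hW0
      omega
  have f1 : k - 1 < W := by omega
  have f2 : ky - 1 < tiles.length := by omega
  have e1 : ((k : Nat) : Int) + -1 = ((k : Nat) : Int) - 1 := by ring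
  have e2 : ((ky : Nat) : Int) + -1 = ((ky : Nat) : Int) - 1 := by ring
  have eL : ∀ (h : 0 < k), ((k : Nat) : Int) - 1 = (((k - 1 : Nat) : Nat) : Int) := by omega
  have eU : ∀ (h : 0 < ky), ((ky : Nat) : Int) - 1 = (((ky - 1 : Nat) : Nat) : Int) := by omega
  have eR : ((k : Nat) : Int) + 1 = (((k + 1 : Nat) : Nat) : Int) := by omega
  have eD : ((ky : Nat) : Int) + 1 = (((ky + 1 : Nat) : Nat) : Int) := by omega
  have g0 : ∀ n : Nat, 0 ≤ ((n : Nat) : Int) := fun n => by omega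
  have d1 : (0 ≤ ((k : Nat) : Int) - 1) ↔ 0 < k := by omega
  have d2 : ((k : Nat) : Int) - 1 < (W : Int) := by omega
  have d3 : 0 ≤ ((k : Nat) : Int) + 1 := by omega
  have d4 : (((k : Nat) : Int) + 1 < (W : Int)) ↔ k + 1 < W := by omega
  have d5 : 0 ≤ ((ky : Nat) : Int) := by omega
  have d6 : ((ky : Nat) : Int) < (tiles.length : Int) := by omega
  have d7 : (0 ≤ ((ky : Nat) : Int) - 1) ↔ 0 < ky := by omega
  have d8 : ((ky : Nat) : Int) - 1 < (tiles.length : Int) := by omega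
  have d9 : 0 ≤ ((ky : Nat) : Int) + 1 := by omega
  have d10 : (((ky : Nat) : Int) + 1 < (tiles.length : Int)) ↔ ky + 1 < tiles.length := by omega
  by_cases h1 : 0 < k <;> by_cases h2 : k + 1 < W <;>
  by_cases h3 : 0 < ky <;> by_cases h4 : ky + 1 < tiles.length <;>
    simp only [List.filter_cons, List.filter_nil, hlen0, PySem.List.len_eq, add_zero, e1, e2,
      d1, d2, d3, d4, d5, d6, d7, d8, d9, d10, g0, Nat.cast_lt, h1, h2, h3, h4, eL, eU, eR, eD,
      decide_true, decide_false, Bool.true_and, Bool.false_and, Bool.and_true, Bool.and_false,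
      Bool.and_self, Bool.false_eq_true, Bool.true_eq_false, eq_self_iff_true, ite_true, ite_false, if_true, if_false,
      List.map_cons, List.map_nil, List.mem_cons, List.not_mem_nil, or_false, false_or,
      List.length_map, hky, hk, f1, f2, true_and, and_true, and_self, not_true, not_false_iff,
      pv_tget tiles W hrect, pv_oget pid tiles W hrect,
      decide_eq_true_eq, Bool.or_eq_true, Bool.and_eq_true,
      Bool.or_false, Bool.false_or] <;>
    first
      | exact Iff.rfl
      | tauto

set_option maxHeartbeats 4000000 in
theorem possible_expansion_sound : ∀ (player_id : Int) (tiles : List (List Int)),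
    Pre_possible_expansion player_id tiles →
    possible_expansion player_id tiles = possible_expansion_alt player_id tiles := by
  intro pid tiles hpre
  have hrect : ∀ r ∈ tiles, r.length = (tiles.headD []).length := hpre
  simp only [possible_expansion, possible_expansion_alt]
  apply pv_foldl_enumerate_congr2 tiles tiles 0 _ _ rfl
  intro ky hky p
  dsimp only
  simp only [zero_add]
  have hrecto : ∀ r ∈ tiles.map (fun row => row.map (fun cell => cell == pid)),
      r.length = (tiles.headD []).length := by
    intro r hr
    obtain ⟨row, hrow, rfl⟩ := List.mem_map.mp hr
    simp [hrect row hrow]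
  have hkyo : ky < (tiles.map (fun row => row.map (fun cell => cell == pid))).length := by
    simp [hky]
  have hmaskl := pv_len_mask _ (tiles.headD []).length ky hrecto hkyo
  have hrowlen : (tiles[ky]'hky).length = (tiles.headD []).length := hrect _ (List.getElem_mem hky)
  apply pv_foldl_enumerate_congr2 _ _ 0 _ _ (by rw [List.length_zip]; omega)
  intro k hk p2
  dsimp only
  simp only [zero_add, List.getElem_zip]
  refine if_congr ?_ rfl rfl
  have hmem := PySem.Set.mem_ofList ((gen_neighbors tiles ((k : Nat) : Int) ((ky : Nat) : Int)).map
    (fun q => PySem.List.pyGetD (PySem.List.pyGetD tiles q.2 []) q.1 0)) pid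
  have hadj := pv_adj_iff pid tiles (tiles.headD []).length ky k hrect rfl hky (by omega)
  have hget : (adjacent_mask (tiles.map (fun row => row.map (fun cell => cell == pid))) ((ky : Nat) : Int))[k]'(by omega) =
      (adjacent_mask (tiles.map (fun row => row.map (fun cell => cell == pid))) ((ky : Nat) : Int)).getD k false :=
    (List.getD_eq_getElem _ _ (by omega)).symm
  rw [hget, hmem, hadj]
  simp only [List.mem_cons, List.not_mem_nil, or_false, not_or]
  constructor
  · rintro ⟨⟨hn1, hn2⟩, hx⟩; exact ⟨hx, hn1, hn2⟩
  · rintro ⟨hx, hn1, hn2⟩; exact ⟨⟨hn1, hn2⟩, hx⟩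

-- ===== VERDICT (by name: the statement is the Claim_ definition above) =====
theorem possible_expansion_spec : Claim_equal_possible_expansion := by
  intro pid tiles _ hpre
  exact possible_expansion_sound pid tiles hpre
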